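-- pv_equiv track=rewrite | github.com/JAYESH1304/BTP | BTP_app.py | find_homorepeats
-- ===== SOURCE A (Python) =====
-- from collections import defaultdict
--
-- def find_homorepeats(protein):
--     n = len(protein)
--     freq = defaultdict(int)
--     i = 0
--     while i < n:
--         curr = protein[i]
--         repeat = ""
--         while i < n and curr == protein[i]:
--             repeat += protein[i]
--             i += 1
--         if len(repeat) > 1:
--             freq[repeat] += 1
--     return freq
-- ===== SOURCE B (Python) =====
-- from collections import defaultdict
--
-- def find_homorepeats(protein):
--     # single pass with a (current char, run length) accumulator; no index arithmetic
--     freq = defaultdict(int)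
--     cur = None
--     cnt = 0
--     for ch in protein:
--         if ch == cur:
--             cnt += 1
--         else:
--             if cnt > 1:
--                 freq[cur * cnt] += 1
--             cur = ch
--             cnt = 1
--     if cnt > 1:
--         freq[cur * cnt] += 1
--     return freq
-- ===== Notes on version B (the rewrite author's own statement) =====
-- stated objective: simpler
-- what changed: Replaced the nested while-loops with manual index arithmetic and per-character string concatenation by a single for-loop over the characters keeping only a (current char, run length) accumulator, flushing a run key built once with cur*cnt when the character changes.
import Mathlib
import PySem

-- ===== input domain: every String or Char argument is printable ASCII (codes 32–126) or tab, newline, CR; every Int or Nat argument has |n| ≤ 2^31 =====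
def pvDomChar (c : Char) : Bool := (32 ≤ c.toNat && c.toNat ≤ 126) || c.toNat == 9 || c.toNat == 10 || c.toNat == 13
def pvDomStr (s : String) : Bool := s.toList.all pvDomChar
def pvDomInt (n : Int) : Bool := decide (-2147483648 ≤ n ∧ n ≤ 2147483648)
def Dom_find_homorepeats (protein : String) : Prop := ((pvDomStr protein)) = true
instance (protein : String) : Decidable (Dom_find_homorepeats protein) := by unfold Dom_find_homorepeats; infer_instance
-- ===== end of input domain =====

-- B replaces A's nested index-scanning while-loops by one pass with a (current char, run length)
-- accumulator (objective: simpler). Both return the dict as its insertion-ordered item list.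

-- ===== PORT A =====
-- inner while: 'while i < n and curr == protein[i]: repeat += protein[i]; i += 1'
-- (the remaining characters stand for the indices i..n-1; repeat is the List Char accumulated)
def pvInnerA (curr : Char) : List Char → List Char → List Char × List Char
  | [], rep => (rep, [])
  | ch :: cs, rep => if curr == ch then pvInnerA curr cs (rep ++ [ch]) else (rep, ch :: cs)

theorem pvInnerA_snd_length (curr : Char) : ∀ (cs rep : List Char),
    (pvInnerA curr cs rep).2.length ≤ cs.length := by
  intro cs
  induction cs with
  | nil => intro rep; simp [pvInnerA]
  | cons ch cs ih =>
    intro rep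
    by_cases h : curr == ch
    · simpa [pvInnerA, h] using Nat.le_succ_of_le (ih (rep ++ [ch]))
    · simp [pvInnerA, h]

-- outer while over the remaining characters; freq[repeat] += 1 on runs of length > 1
def pvOuterA : List Char → PySem.Dict String Int → PySem.Dict String Int
  | [], f => f
  | c :: cs, f =>
    let p := pvInnerA c cs [c]
    let f' := if p.1.length > 1 then f.insert (String.mk p.1) (f.getD (String.mk p.1) 0 + 1) else f
    pvOuterA p.2 f'
termination_by cs => cs.length
decreasing_by
  exact Nat.lt_succ_of_le (pvInnerA_snd_length _ _ _)

def find_homorepeats (protein : String) : List (String × Int) :=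
  (pvOuterA protein.toList PySem.Dict.empty).items

-- ===== PORT B =====
-- 'cur * cnt' (cur is a 1-char string in Source B; only used with cnt > 1, so cur is set)
def pvKeyB (cur : Option Char) (cnt : Nat) : String :=
  match cur with
  | some c => String.mk (List.replicate cnt c)
  | none => ""

def pvBumpB (f : PySem.Dict String Int) (k : String) : PySem.Dict String Int :=
  f.insert k (f.getD k 0 + 1)

-- the loop body of Source B's single for-loop; state = (cur, cnt, freq)
def pvStepB (st : Option Char × Nat × PySem.Dict String Int) (ch : Char) :
    Option Char × Nat × PySem.Dict String Int :=
  match st with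
  | (cur, cnt, f) =>
    if cur == some ch then (cur, cnt + 1, f)
    else
      let f' := if cnt > 1 then pvBumpB f (pvKeyB cur cnt) else f
      (some ch, 1, f')

-- the final 'if cnt > 1: freq[cur * cnt] += 1'
def pvFlushB (st : Option Char × Nat × PySem.Dict String Int) : PySem.Dict String Int :=
  if st.2.1 > 1 then pvBumpB st.2.2 (pvKeyB st.1 st.2.1) else st.2.2

def find_homorepeats_alt (protein : String) : List (String × Int) :=
  (pvFlushB (protein.toList.foldl pvStepB (none, 0, PySem.Dict.empty))).items

-- ===== PRECONDITION & SPEC =====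
def Spec_find_homorepeats (protein : String) (out : List (String × Int)) : Prop := out = find_homorepeats_alt protein
instance (protein : String) (out : List (String × Int)) : Decidable (Spec_find_homorepeats protein out) := by unfold Spec_find_homorepeats; infer_instance

-- ===== CLAIM (what is proved, stated in full; the proofs are below) =====
def Claim_equal_find_homorepeats : Prop := ∀ (protein : String), Dom_find_homorepeats protein → Spec_find_homorepeats protein (find_homorepeats protein)

-- ===== LEMMAS AND PROOFS =====

-- main invariant: mid-run, B's fold+flush equals A's remaining outer loop
theorem pvMain (cs : List Char) : ∀ (c : Char) (k : Nat) (f : PySem.Dict String Int), 1 ≤ k →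
    pvFlushB (cs.foldl pvStepB (some c, k, f)) =
      pvOuterA ((pvInnerA c cs (List.replicate k c)).2)
        (if (pvInnerA c cs (List.replicate k c)).1.length > 1 then
          pvBumpB f (String.mk (pvInnerA c cs (List.replicate k c)).1) else f) := by
  induction cs with
  | nil =>
    intro c k f hk
    by_cases h : k > 1 <;>
      simp [pvInnerA, pvFlushB, pvOuterA, pvKeyB, h, List.foldl]
  | cons ch cs ih =>
    intro c k f hk
    by_cases h : c = ch
    · subst h
      have hstep : pvStepB (some c, k, f) c = (some c, k + 1, f) := by
        simp [pvStepB]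
      have hin : pvInnerA c (c :: cs) (List.replicate k c)
          = pvInnerA c cs (List.replicate (k + 1) c) := by
        have : List.replicate k c ++ [c] = List.replicate (k + 1) c := by
          simp [List.replicate_succ']
        simp [pvInnerA, this]
      rw [List.foldl_cons, hstep, hin, ih c (k + 1) f (by omega)]
    · have hbe : (some c == some ch) = false := by
        simp [beq_iff_eq]; exact h
      have hbe2 : (c == ch) = false := by simp [beq_iff_eq]; exact h
      have hstep : pvStepB (some c, k, f) ch =
          (some ch, 1, if k > 1 then pvBumpB f (pvKeyB (some c) k) else f) := by
        simp [pvStepB, hbe]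
      have hin : pvInnerA c (ch :: cs) (List.replicate k c)
          = (List.replicate k c, ch :: cs) := by
        simp [pvInnerA, hbe2]
      rw [List.foldl_cons, hstep, ih ch 1 _ (by omega), hin]
      have h1 : pvInnerA ch cs [ch] = pvInnerA ch cs (List.replicate 1 ch) := by rfl
      simp only [pvOuterA, pvKeyB, h1]
      by_cases hk1 : k > 1 <;> simp [hk1, pvBumpB]

theorem find_homorepeats_spec' (protein : String) :
    find_homorepeats protein = find_homorepeats_alt protein := by
  unfold find_homorepeats find_homorepeats_alt
  congr 1
  cases hl : protein.toList with
  | nil => simp [pvOuterA, pvFlushB, List.foldl]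
  | cons c cs =>
    have hstep : pvStepB (none, 0, PySem.Dict.empty) c = (some c, 1, PySem.Dict.empty) := by
      simp [pvStepB]
    rw [List.foldl_cons, hstep, pvMain cs c 1 PySem.Dict.empty (le_refl 1)]
    have h1 : pvInnerA c cs [c] = pvInnerA c cs (List.replicate 1 c) := rfl
    simp only [pvOuterA, h1, pvBumpB]

-- ===== VERDICT (by name: the statement is the Claim_ definition above) =====
theorem find_homorepeats_spec : Claim_equal_find_homorepeats := by
  intro protein _
  exact find_homorepeats_spec' protein
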